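-- pv_equiv track=rewrite | github.com/lupeijun-design/LeapsCora_urban_generator | generate_step2_building.py | _choose_main_side
-- ===== SOURCE A (Python) =====
-- FRONTAGE_PRIORITY = {
--     "main_street": 5,
--     "scenic_street": 4,
--     "secondary_street": 3,
--     "internal_street": 2,
--     "back_street": 1,
-- }
--
-- def _choose_main_side(side_edge_type):
--     sides = list(side_edge_type.keys())
--     main = [s for s in sides if side_edge_type.get(s) == "main_street"]
--     if main:
--         return main[0]
--     sec = [s for s in sides if side_edge_type.get(s) == "secondary_street"]
--     if sec:
--         return sec[0]
--     return max(sides, key=lambda s: FRONTAGE_PRIORITY.get(side_edge_type.get(s, "back_street"), 0))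
-- ===== SOURCE B (Python) =====
-- def _choose_main_side(side_edge_type):
--     # One pass: a rank table that lifts main_street and secondary_street above
--     # the raw FRONTAGE_PRIORITY order, then a single max over the keys.
--     rank = {
--         "main_street": 7,
--         "secondary_street": 6,
--         "scenic_street": 4,
--         "internal_street": 2,
--         "back_street": 1,
--     }
--     return max(side_edge_type, key=lambda s: rank.get(side_edge_type[s], 0))
-- ===== Notes on version B (the rewrite author's own statement) =====
-- stated objective: simpler
-- what changed: Replaces the two list-comprehension filters plus a final keyed max by a single max over the dict's keys with a corrected rank table (main_street=7, secondary_street=6 boosted above scenic_street=4, internal=2, back=1, unknown=0), preserving first-key tie-breaking and the empty-dict ValueError.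
import Mathlib
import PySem

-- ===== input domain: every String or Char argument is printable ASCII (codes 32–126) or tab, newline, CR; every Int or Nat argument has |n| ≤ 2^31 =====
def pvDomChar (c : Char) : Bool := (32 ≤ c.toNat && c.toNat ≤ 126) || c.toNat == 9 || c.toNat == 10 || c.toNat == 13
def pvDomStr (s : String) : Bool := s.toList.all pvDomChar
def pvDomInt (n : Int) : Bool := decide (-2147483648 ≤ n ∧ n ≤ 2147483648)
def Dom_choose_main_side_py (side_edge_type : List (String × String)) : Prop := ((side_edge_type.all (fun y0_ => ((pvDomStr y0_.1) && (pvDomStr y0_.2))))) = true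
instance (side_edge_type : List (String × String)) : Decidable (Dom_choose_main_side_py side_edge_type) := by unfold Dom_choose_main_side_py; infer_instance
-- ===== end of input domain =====

-- B replaces A's two filter passes + keyed max by ONE max over the keys with a
-- corrected rank table (main_street and secondary_street boosted above the rest);
-- objective: simpler (single pass, same first-key tie-breaking).

-- ===== PORT A =====
def FRONTAGE_PRIORITY : PySem.Dict String Int :=
  PySem.Dict.mk [("main_street", 5), ("scenic_street", 4), ("secondary_street", 3),
                 ("internal_street", 2), ("back_street", 1)]

def choose_main_side_py (side_edge_type : List (String × String)) : String :=
  let d := PySem.Dict.mk side_edge_type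
  let sides := d.keys
  let main := sides.filter (fun s => d.get? s == some "main_street")
  match main with
  | m :: _ => m
  | [] =>
    let sec := sides.filter (fun s => d.get? s == some "secondary_street")
    match sec with
    | m :: _ => m
    | [] =>
      -- max(sides, key=…) raises ValueError on the empty dict; Pre_ excludes it
      (PySem.List.max? sides
        (fun s => FRONTAGE_PRIORITY.getD (d.getD s "back_street") 0)).getD ""

-- ===== PORT B =====
def pvRank : PySem.Dict String Int :=
  PySem.Dict.mk [("main_street", 7), ("secondary_street", 6), ("scenic_street", 4),
                 ("internal_street", 2), ("back_street", 1)]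

def choose_main_side_py_alt (side_edge_type : List (String × String)) : String :=
  let d := PySem.Dict.mk side_edge_type
  -- side_edge_type[s] for s a key of the dict: get? never misses; '' only pads totality
  (PySem.List.max? d.keys
    (fun s => pvRank.getD ((d.get? s).getD "") 0)).getD ""

-- ===== PRECONDITION & SPEC =====
-- Pre_ excludes the empty dict (A's max() raises ValueError there; B raises too) and
-- association lists with duplicate keys, which do not represent any Python dict.
def Pre_choose_main_side_py (side_edge_type : List (String × String)) : Prop :=
  side_edge_type ≠ [] ∧ (side_edge_type.map Prod.fst).Nodup
instance (side_edge_type : List (String × String)) : Decidable (Pre_choose_main_side_py side_edge_type) := by unfold Pre_choose_main_side_py; infer_instance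

def pvWitness_choose_main_side_py : (List (String × String)) :=
  [("north", "main_street"), ("south", "back_street")]

def Spec_choose_main_side_py (side_edge_type : List (String × String)) (out : String) : Prop := out = choose_main_side_py_alt side_edge_type
instance (side_edge_type : List (String × String)) (out : String) : Decidable (Spec_choose_main_side_py side_edge_type out) := by unfold Spec_choose_main_side_py; infer_instance

-- ===== CLAIM (what is proved, stated in full; the proofs are below) =====
def Claim_equal_choose_main_side_py : Prop := ∀ (side_edge_type : List (String × String)), Dom_choose_main_side_py side_edge_type → Pre_choose_main_side_py side_edge_type → Spec_choose_main_side_py side_edge_type (choose_main_side_py side_edge_type)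

-- ===== LEMMAS AND PROOFS =====

-- the fold step of PySem.List.max? (named so lemmas about it rewrite syntactically)
def pvStep {α : Type} (key : α → Int) : Option α → α → Option α :=
  fun acc x => match acc with
    | none => some x
    | some c => if key c < key x then some x else some c

theorem pv_max?_eq_foldl {α : Type} (xs : List α) (key : α → Int) :
    PySem.List.max? xs key = xs.foldl (pvStep key) none := rfl

-- closed evaluation of the two literal rank tables on an arbitrary key
theorem pvRank_eval (v : String) : pvRank.getD v 0 =
    if v = "main_street" then 7 else if v = "secondary_street" then 6
    else if v = "scenic_street" then 4 else if v = "internal_street" then 2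
    else if v = "back_street" then 1 else 0 := by
  simp only [pvRank, PySem.Dict.getD_eq_get?_getD, PySem.Dict.get?_mk_cons, beq_iff_eq]
  split_ifs <;> subst_eqs <;> simp_all [PySem.Dict.get?, eq_comm]

theorem pvFP_eval (v : String) : FRONTAGE_PRIORITY.getD v 0 =
    if v = "main_street" then 5 else if v = "scenic_street" then 4
    else if v = "secondary_street" then 3 else if v = "internal_street" then 2
    else if v = "back_street" then 1 else 0 := by
  simp only [FRONTAGE_PRIORITY, PySem.Dict.getD_eq_get?_getD, PySem.Dict.get?_mk_cons, beq_iff_eq]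
  split_ifs <;> subst_eqs <;> simp_all [PySem.Dict.get?, eq_comm]

theorem pvRank_le_seven (v : String) : pvRank.getD v 0 ≤ 7 := by
  rw [pvRank_eval]; split_ifs <;> omega

theorem pvRank_lt_seven (v : String) (h : v ≠ "main_street") : pvRank.getD v 0 < 7 := by
  rw [pvRank_eval, if_neg h]; split_ifs <;> omega

theorem pvRank_lt_six (v : String) (h1 : v ≠ "main_street") (h2 : v ≠ "secondary_street") :
    pvRank.getD v 0 < 6 := by
  rw [pvRank_eval, if_neg h1, if_neg h2]; split_ifs <;> omega

theorem pvRank_eq_fp (v : String) (h1 : v ≠ "main_street") (h2 : v ≠ "secondary_street") :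
    pvRank.getD v 0 = FRONTAGE_PRIORITY.getD v 0 := by
  simp only [pvRank_eval, pvFP_eval, if_neg h1, if_neg h2]

-- running the fold over elements strictly below key m keeps the state below key m
theorem pv_foldl_lt_inv {α : Type} (key : α → Int) (m : α) :
    ∀ (l : List α) (acc : Option α),
      (acc = none ∨ ∃ b, acc = some b ∧ key b < key m) →
      (∀ y ∈ l, key y < key m) →
      (l.foldl (pvStep key) acc = none ∨
        ∃ b, l.foldl (pvStep key) acc = some b ∧ key b < key m) := by
  intro l
  induction l with
  | nil => intro acc hacc _; simpa using hacc
  | cons x t ih =>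
    intro acc hacc hl
    simp only [List.foldl_cons]
    apply ih
    · rcases hacc with h | ⟨b, hb, hlt⟩
      · subst h; exact Or.inr ⟨x, rfl, hl x (by simp)⟩
      · subst hb
        by_cases hc : key b < key x
        · simp only [pvStep, hc, if_true]; exact Or.inr ⟨x, rfl, hl x (by simp)⟩
        · simp only [pvStep, hc, if_false]; exact Or.inr ⟨b, rfl, hlt⟩
    · intro y hy; exact hl y (by simp [hy])

-- once the state holds a maximal element, the fold never replaces it
theorem pv_foldl_keep {α : Type} (key : α → Int) (m : α) :
    ∀ (r : List α), (∀ y ∈ r, key y ≤ key m) →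
      r.foldl (pvStep key) (some m) = some m := by
  intro r
  induction r with
  | nil => intro _; rfl
  | cons x t ih =>
    intro hr
    simp only [List.foldl_cons]
    have hx : ¬ key m < key x := not_lt.mpr (hr x (by simp))
    simp only [pvStep, hx, if_false]
    exact ih (fun y hy => hr y (by simp [hy]))

-- max? returns the FIRST element attaining the maximum key
theorem pv_max?_first {α : Type} (key : α → Int) (l r : List α) (m : α)
    (hl : ∀ y ∈ l, key y < key m) (hr : ∀ y ∈ r, key y ≤ key m) :
    PySem.List.max? (l ++ m :: r) key = some m := by
  rw [pv_max?_eq_foldl, List.foldl_append, List.foldl_cons]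
  rcases pv_foldl_lt_inv key m l none (Or.inl rfl) hl with h | ⟨b, hb, hlt⟩
  · rw [h]; exact pv_foldl_keep key m r hr
  · rw [hb]
    simp only [pvStep, hlt, if_true]
    exact pv_foldl_keep key m r hr

-- the fold only compares keys of list members / the seed: congruence under pointwise equality
theorem pv_foldl_congr {α : Type} (k1 k2 : α → Int) :
    ∀ (xs : List α) (acc : Option α),
      (∀ x ∈ xs, k1 x = k2 x) → (∀ b, acc = some b → k1 b = k2 b) →
      xs.foldl (pvStep k1) acc = xs.foldl (pvStep k2) acc := by
  intro xs
  induction xs with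
  | nil => intro acc _ _; rfl
  | cons x t ih =>
    intro acc hxs hacc
    simp only [List.foldl_cons]
    have hx : k1 x = k2 x := hxs x (by simp)
    have hstep : pvStep k1 acc x = pvStep k2 acc x ∧
        (∀ b, pvStep k1 acc x = some b → k1 b = k2 b) := by
      cases acc with
      | none =>
        refine ⟨rfl, ?_⟩
        intro b hb
        simp only [pvStep] at hb
        cases hb; exact hx
      | some c =>
        have hc : k1 c = k2 c := hacc c rfl
        simp only [pvStep]
        rw [hc, hx]
        refine ⟨rfl, ?_⟩
        intro b hb
        split_ifs at hb <;> cases hb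
        · exact hx
        · exact hc
    rw [hstep.1]
    exact ih _ (fun y hy => hxs y (by simp [hy])) (fun b hb => hstep.2 b (hstep.1 ▸ hb))

-- a key of the dict always has a value
theorem pv_get?_of_mem_keys {d : PySem.Dict String String} {s : String}
    (h : s ∈ d.keys) : ∃ v, d.get? s = some v := by
  have hc : d.contains s = true := (PySem.Dict.contains_iff_mem_keys d s).mpr h
  rw [PySem.Dict.contains_eq_isSome_get?] at hc
  exact Option.isSome_iff_exists.mp hc

-- ===== VERDICT =====
theorem choose_main_side_py_spec : Claim_equal_choose_main_side_py := by
  unfold Claim_equal_choose_main_side_py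
  intro sides_in _ _
  unfold Spec_choose_main_side_py
  simp only [choose_main_side_py, choose_main_side_py_alt]
  set d := PySem.Dict.mk sides_in with hd
  set fB : String → Int := fun s => pvRank.getD ((d.get? s).getD "") 0 with hfB
  have fB_of_get? : ∀ s v, d.get? s = some v → fB s = pvRank.getD v 0 := by
    intro s v h; simp [hfB, h]
  have fB_le : ∀ s, fB s ≤ 7 := fun s => pvRank_le_seven _
  have fB_not_main : ∀ s, ¬ (d.get? s == some "main_street") = true → fB s < 7 := by
    intro s h
    rcases hgs : d.get? s with _ | v
    · simp only [hfB, hgs, Option.getD_none]; exact pvRank_lt_seven "" (by decide)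
    · rw [fB_of_get? s v hgs]
      apply pvRank_lt_seven
      intro hv; subst hv; simp [hgs] at h
  cases hmain : List.filter (fun s => d.get? s == some "main_street") d.keys with
  | cons m t =>
    -- A returns m, the first key mapped to main_street; B's rank there is the strict max 7
    obtain ⟨l, r, hsplit, hlpre, hpm, -⟩ := List.filter_eq_cons_iff.mp hmain
    have hgm : d.get? m = some "main_street" := by simpa using hpm
    have hfm : fB m = 7 := by rw [fB_of_get? m _ hgm]; decide
    have hmax : PySem.List.max? d.keys fB = some m := by
      rw [hsplit]
      apply pv_max?_first
      · intro y hy; rw [hfm]; exact fB_not_main y (hlpre y hy)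
      · intro y _; rw [hfm]; exact fB_le y
    rw [hmax]; rfl
  | nil =>
    have hnomain : ∀ s ∈ d.keys, ¬ (d.get? s == some "main_street") = true :=
      List.filter_eq_nil_iff.mp hmain
    have fB_le6 : ∀ s ∈ d.keys, fB s ≤ 6 := by
      intro s hs
      have := fB_not_main s (hnomain s hs); omega
    cases hsec : List.filter (fun s => d.get? s == some "secondary_street") d.keys with
    | cons m t =>
      -- A returns m, the first key mapped to secondary_street; B's rank there is 6,
      -- strictly above everything before it and ≥ everything after (no main_street exists)
      obtain ⟨l, r, hsplit, hlpre, hpm, -⟩ := List.filter_eq_cons_iff.mp hsec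
      have hgm : d.get? m = some "secondary_street" := by simpa using hpm
      have hfm : fB m = 6 := by rw [fB_of_get? m _ hgm]; decide
      have hmax : PySem.List.max? d.keys fB = some m := by
        rw [hsplit]
        apply pv_max?_first
        · intro y hy
          rw [hfm]
          have hymem : y ∈ d.keys := by rw [hsplit]; simp [List.mem_append, hy]
          rcases hgy : d.get? y with _ | v
          · simp only [hfB, hgy, Option.getD_none]
            exact pvRank_lt_six "" (by decide) (by decide)
          · rw [fB_of_get? y v hgy]
            apply pvRank_lt_six
            · intro hv; subst hv; exact hnomain y hymem (by simp [hgy])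
            · intro hv; subst hv; exact hlpre y hy (by simp [hgy])
        · intro y hy
          rw [hfm]
          exact fB_le6 y (by rw [hsplit]; simp [List.mem_append, hy])
      rw [hmax]; rfl
    | nil =>
      -- no main_street, no secondary_street: the two rank tables agree on every key
      have hnosec : ∀ s ∈ d.keys, ¬ (d.get? s == some "secondary_street") = true :=
        List.filter_eq_nil_iff.mp hsec
      have hcongr : PySem.List.max?
          d.keys (fun s => FRONTAGE_PRIORITY.getD (d.getD s "back_street") 0) =
          PySem.List.max? d.keys fB := by
        rw [pv_max?_eq_foldl, pv_max?_eq_foldl]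
        apply pv_foldl_congr
        · intro s hs
          obtain ⟨v, hv⟩ := pv_get?_of_mem_keys hs
          have h1 : v ≠ "main_street" := by
            intro h; subst h; exact hnomain s hs (by simp [hv])
          have h2 : v ≠ "secondary_street" := by
            intro h; subst h; exact hnosec s hs (by simp [hv])
          have hgd : d.getD s "back_street" = v := PySem.Dict.getD_of_get?_eq_some d "back_street" hv
          rw [hgd, fB_of_get? s v hv]
          exact (pvRank_eq_fp v h1 h2).symm
        · intro b h; cases h
      rw [hcongr]
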